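-- pv_equiv track=rewrite | github.com/MarinaNakhamchik/homework | lesson_21/prices.py | tradet
-- ===== SOURCE A (Python) =====
-- def tradet(prices):
--     for i in range(len(prices) - 1):
--         if prices.index(min(prices)) < prices.index(max(prices)):
--             return max(prices) - min(prices)
--         else:
--             prices.pop(prices.index(max(prices)))
--     for j in range(len(prices)):
--         return min(prices) - max(prices)
-- ===== SOURCE B (Python) =====
-- def tradet(prices):
--     if not prices:
--         return None
--     mn = prices[0]
--     mx = None  # max of the elements after the first occurrence of the current min
--     for x in prices[1:]:
--         if x < mn:
--             mn, mx = x, None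
--         else:
--             mx = x if mx is None or x > mx else mx
--     return 0 if mx is None else mx - mn
-- ===== Notes on version B (the rewrite author's own statement) =====
-- stated objective: faster
-- what changed: Replaces A's repeated min/max/index scans with pops of the current max (quadratic) by a single left-to-right pass that tracks the running minimum and the maximum of the elements seen after the first occurrence of that minimum.
import Mathlib
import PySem

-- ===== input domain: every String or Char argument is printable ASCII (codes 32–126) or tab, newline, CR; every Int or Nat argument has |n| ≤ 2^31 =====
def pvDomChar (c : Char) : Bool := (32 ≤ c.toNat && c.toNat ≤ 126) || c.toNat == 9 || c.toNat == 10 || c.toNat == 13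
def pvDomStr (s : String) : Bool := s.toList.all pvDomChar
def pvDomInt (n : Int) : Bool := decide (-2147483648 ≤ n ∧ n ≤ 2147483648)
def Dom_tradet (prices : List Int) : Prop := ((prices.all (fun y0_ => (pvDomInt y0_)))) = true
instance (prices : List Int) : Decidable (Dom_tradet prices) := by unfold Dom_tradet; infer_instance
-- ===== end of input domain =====

-- B replaces A's quadratic repeated min/max/index scans with pops by one O(n) pass
-- tracking the running min and the max of elements after its first occurrence.
-- A mutates its argument (pops elements); the equivalence proved here is about the RETURN value only.

-- ===== PORT A =====
-- the first 'for i in range(len(prices)-1)' loop of A, with the trailing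
-- 'for j in range(len(prices)): return min(prices)-max(prices)' as the fuel-0 base case;
-- the 'none' fallback branches correspond to min/max/index/pop raising (unreachable: the list is nonempty there)
def tradetGo : Nat → List Int → Option Int
  | 0, ps =>
    if ps.length > 0 then
      match PySem.List.min? ps (fun y => y), PySem.List.max? ps (fun y => y) with
      | some mn, some mx => some (mn - mx)
      | _, _ => none
    else none
  | n+1, ps =>
    match PySem.List.min? ps (fun y => y), PySem.List.max? ps (fun y => y) with
    | some mn, some mx =>
      match PySem.List.index? ps mn, PySem.List.index? ps mx with
      | some imn, some imx =>
        if imn < imx then some (mx - mn)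
        else
          match PySem.List.pop? ps (imx : Int) with
          | some (_, ps') => tradetGo n ps'
          | none => none
      | _, _ => none
    | _, _ => none

def tradet (prices : List Int) : Option Int := tradetGo (prices.length - 1) prices

-- ===== PORT B =====
-- loop body of Source B: state = (mn, mx) with mx = none while no element has followed the current min
def altStep (st : Int × Option Int) (y : Int) : Int × Option Int :=
  if y < st.1 then (y, none)
  else (st.1, match st.2 with | none => some y | some m => some (if m < y then y else m))

def tradet_alt (prices : List Int) : Option Int :=
  match prices with
  | [] => none
  | x :: xs =>
    let st := xs.foldl altStep (x, none)
    some (match st.2 with | none => 0 | some m => m - st.1)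

-- ===== PRECONDITION & SPEC =====
def Spec_tradet (prices : List Int) (out : Option Int) : Prop := out = tradet_alt prices
instance (prices : List Int) (out : Option Int) : Decidable (Spec_tradet prices out) := by unfold Spec_tradet; infer_instance

-- ===== CLAIM (what is proved, stated in full; the proofs are below) =====
def Claim_equal_tradet : Prop := ∀ (prices : List Int), Dom_tradet prices → Spec_tradet prices (tradet prices)

-- ===== LEMMAS AND PROOFS =====

-- folding the suffix after the min: the min component is stable and the other tracks the running max
theorem foldl_altStep_some (l : List Int) (mn m : Int) (hm : mn ≤ m)
    (hl : ∀ y ∈ l, mn ≤ y) :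
    l.foldl altStep (mn, some m) = (mn, some (l.foldl max m)) := by
  induction l generalizing m with
  | nil => rfl
  | cons y t ih =>
    have hy : mn ≤ y := hl y (by simp)
    have : altStep (mn, some m) y = (mn, some (max m y)) := by
      simp [altStep, not_lt.mpr hy, max_def]
      split_ifs <;> omega
    rw [List.foldl_cons, this, List.foldl_cons,
      ih (max m y) (le_trans hm (le_max_left m y)) (fun z hz => hl z (by simp [hz]))]

-- folding the part before the first min just keeps the first component above mn
theorem foldl_altStep_pre (mn : Int) (suf : List Int) :
    ∀ (pre : List Int) (st : Int × Option Int), (∀ y ∈ pre, mn < y) → mn < st.1 →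
    (pre ++ mn :: suf).foldl altStep st = suf.foldl altStep (mn, none) := by
  intro pre
  induction pre with
  | nil =>
    intro st _ hst
    simp [altStep, hst]
  | cons p t ih =>
    intro st hpre hst
    have hp : mn < p := hpre p (by simp)
    rw [List.cons_append, List.foldl_cons]
    refine ih _ (fun y hy => hpre y (by simp [hy])) ?_
    simp only [altStep]
    split <;> simp <;> omega

-- B's value on a first-min decomposition
theorem alt_char (pre suf : List Int) (mn : Int)
    (hpre : ∀ y ∈ pre, mn < y) (hsuf : ∀ y ∈ suf, mn ≤ y) :
    tradet_alt (pre ++ mn :: suf) = some (suf.foldl max mn - mn) := by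
  have tail : suf.foldl altStep (mn, none) =
      (mn, match suf with | [] => none | y :: t => some (t.foldl max y)) := by
    cases suf with
    | nil => rfl
    | cons y t =>
      have hy : mn ≤ y := hsuf y (by simp)
      rw [List.foldl_cons]
      have h1 : altStep (mn, none) y = (mn, some y) := by
        simp [altStep, not_lt.mpr hy]
      rw [h1, foldl_altStep_some t mn y hy (fun z hz => hsuf z (by simp [hz]))]
  have finish : ∀ st : Int × Option Int, st = suf.foldl altStep (mn, none) →
      (some (match st.2 with | none => 0 | some m => m - st.1) : Option Int) =
        some (suf.foldl max mn - mn) := by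
    intro st hst
    rw [hst, tail]
    cases suf with
    | nil => simp
    | cons y t =>
      have hy : mn ≤ y := hsuf y (by simp)
      simp only [List.foldl_cons, max_eq_right hy]
  cases pre with
  | nil =>
    simp only [List.nil_append, tradet_alt]
    exact finish _ rfl
  | cons p t =>
    have hp : mn < p := hpre p (by simp)
    simp only [List.cons_append, tradet_alt]
    rw [foldl_altStep_pre mn suf t (p, none) (fun y hy => hpre y (by simp [hy])) hp]
    exact finish _ rfl

-- first-min decomposition of a nonempty list
theorem exists_split (x : Int) (xs : List Int) :
    ∃ pre mn suf, x :: xs = pre ++ mn :: suf ∧ (∀ y ∈ pre, mn < y) ∧ (∀ y ∈ suf, mn ≤ y) := by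
  obtain ⟨m, hm⟩ : ∃ m, PySem.List.min? (x :: xs) (fun y => y) = some m := by
    cases h : PySem.List.min? (x :: xs) (fun y => y) with
    | none => exact absurd ((PySem.List.min?_eq_none_iff _ _).mp h) (by simp)
    | some m => exact ⟨m, rfl⟩
  have hmem : m ∈ x :: xs := PySem.List.min?_mem hm
  have hmin : ∀ y ∈ x :: xs, m ≤ y := PySem.List.min?_isMin hm
  obtain ⟨k, hk⟩ : ∃ k, PySem.List.index? (x :: xs) m = some k := by
    cases h : PySem.List.index? (x :: xs) m with
    | none => exact absurd ((PySem.List.index?_eq_none_iff _ _).mp h) (by simp [hmem])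
    | some k => exact ⟨k, rfl⟩
  obtain ⟨pre, suf, heq, _, hnotin⟩ := (PySem.List.index?_eq_some_iff _ _ _).mp hk
  refine ⟨pre, m, suf, heq, ?_, ?_⟩
  · intro y hy
    have h1 : m ≤ y := hmin y (by rw [heq]; exact List.mem_append_left _ hy)
    have h2 : y ≠ m := fun h => hnotin (h ▸ hy)
    omega
  · intro y hy
    exact hmin y (by rw [heq]; exact List.mem_append_right _ (by simp [hy]))

-- A's loop returns B's value, given fuel = length - 1
theorem go_char (n : Nat) : ∀ (pre suf : List Int) (mn : Int),
    (pre ++ mn :: suf).length = n + 1 →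
    (∀ y ∈ pre, mn < y) → (∀ y ∈ suf, mn ≤ y) →
    tradetGo n (pre ++ mn :: suf) = some (suf.foldl max mn - mn) := by
  induction n with
  | zero =>
    intro pre suf mn hlen hpre hsuf
    simp only [List.length_append, List.length_cons] at hlen
    obtain rfl : pre = [] := List.length_eq_zero_iff.mp (by omega)
    obtain rfl : suf = [] := List.length_eq_zero_iff.mp (by omega)
    simp [tradetGo, PySem.List.min?_id_cons, PySem.List.max?_id_cons]
  | succ n ih =>
    intro pre suf mn hlen hpre hsuf
    have hmnmem : mn ∈ pre ++ mn :: suf := List.mem_append_right _ (by simp)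
    have hge : ∀ y ∈ pre ++ mn :: suf, mn ≤ y := by
      intro y hy
      rcases List.mem_append.mp hy with h | h
      · exact le_of_lt (hpre y h)
      · rcases List.mem_cons.mp h with rfl | h
        · exact le_refl y
        · exact hsuf y h
    obtain ⟨m0, hm0⟩ : ∃ m0, PySem.List.min? (pre ++ mn :: suf) (fun y => y) = some m0 := by
      cases h : PySem.List.min? (pre ++ mn :: suf) (fun y => y) with
      | none => exact absurd ((PySem.List.min?_eq_none_iff _ _).mp h) (by simp)
      | some m0 => exact ⟨m0, rfl⟩
    have hm0eq : m0 = mn :=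
      le_antisymm (PySem.List.min?_isMin hm0 mn hmnmem) (hge m0 (PySem.List.min?_mem hm0))
    rw [hm0eq] at hm0
    obtain ⟨mx, hmx⟩ : ∃ mx, PySem.List.max? (pre ++ mn :: suf) (fun y => y) = some mx := by
      cases h : PySem.List.max? (pre ++ mn :: suf) (fun y => y) with
      | none => exact absurd ((PySem.List.max?_eq_none_iff _ _).mp h) (by simp)
      | some mx => exact ⟨mx, rfl⟩
    have hmxmem : mx ∈ pre ++ mn :: suf := PySem.List.max?_mem hmx
    have hmax : ∀ y ∈ pre ++ mn :: suf, y ≤ mx := PySem.List.max?_isMax hmx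
    have hmnnotpre : mn ∉ pre := fun h => lt_irrefl mn (hpre mn h)
    have himn : PySem.List.index? (pre ++ mn :: suf) mn = some pre.length :=
      (PySem.List.index?_eq_some_iff _ _ _).mpr ⟨pre, suf, rfl, rfl, hmnnotpre⟩
    obtain ⟨imx, himx⟩ : ∃ k, PySem.List.index? (pre ++ mn :: suf) mx = some k := by
      cases h : PySem.List.index? (pre ++ mn :: suf) mx with
      | none => exact absurd ((PySem.List.index?_eq_none_iff _ _).mp h) (by simp [hmxmem])
      | some k => exact ⟨k, rfl⟩
    obtain ⟨hklt, hget, _⟩ := PySem.List.getElem_of_index?_eq_some himx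
    simp only [tradetGo, hm0, hmx, himn, himx]
    by_cases hlt : pre.length < imx
    · simp only [if_pos hlt]
      -- the first max sits after the first min: mx is the max of the suffix
      have hmxsuf : mx ∈ suf := by
        have h1 : (pre ++ mn :: suf)[imx] = (mn :: suf)[imx - pre.length]'(by
            simp only [List.length_append, List.length_cons] at hklt ⊢; omega) :=
          List.getElem_append_right (le_of_lt hlt)
        obtain ⟨j, hj⟩ : ∃ j, imx - pre.length = j + 1 := ⟨imx - pre.length - 1, by omega⟩
        rw [← hget, h1]
        simp only [hj, List.getElem_cons_succ]
        exact List.getElem_mem _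
      have h2 : mx ≤ suf.foldl max mn := (PySem.List.le_foldl_max suf mn).2 mx hmxsuf
      have h3 : suf.foldl max mn ≤ mx := by
        rcases PySem.List.foldl_max_mem suf mn with h | h
        · rw [h]; exact hmax mn hmnmem
        · exact hmax _ (List.mem_append_right _ (List.mem_cons_of_mem _ h))
      rw [le_antisymm h2 h3]
    · simp only [if_neg hlt]
      rw [PySem.List.pop?_natCast _ imx hklt]
      rcases Nat.lt_or_ge imx pre.length with hcase | hcase
      · -- the popped max lies strictly before the first min
        rw [List.eraseIdx_append_of_lt_length hcase]
        apply ih (pre.eraseIdx imx) suf mn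
        · simp only [List.length_append, List.length_cons, List.length_eraseIdx] at hlen ⊢
          simp only [if_pos hcase]
          omega
        · exact fun y hy => hpre y (List.mem_of_mem_eraseIdx hy)
        · exact hsuf
      · -- first max = first min position: everything equals mn
        have himxeq : imx = pre.length := le_antisymm (not_lt.mp hlt) hcase
        have hmxeq : mx = mn := by
          subst himxeq
          rw [← hget, List.getElem_append_right (le_refl _)]
          simp
        obtain rfl : pre = [] := by
          cases hp : pre with
          | nil => rfl
          | cons p t =>
            exfalso
            have h1 : mn < p := hpre p (by simp [hp])
            have h2 : p ≤ mx := hmax p (by simp [hp])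
            omega
        simp only [List.length_append, List.length_cons, List.length_nil] at hlen
        cases suf with
        | nil => simp at hlen
        | cons s0 t =>
          have hall : ∀ y ∈ s0 :: t, y = mn := fun y hy =>
            le_antisymm (hmxeq ▸ hmax y (List.mem_append_right _ (List.mem_cons_of_mem _ hy)))
              (hsuf y hy)
          obtain rfl : s0 = mn := hall s0 (by simp)
          have := ih [] t s0 (by simp at hlen ⊢; omega) (by simp)
            (fun y hy => le_of_eq (hall y (by simp [hy])).symm)
          simp only [List.nil_append, himxeq, List.length_nil] at *
          rw [List.eraseIdx_cons_zero, this]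
          simp
-- ===== VERDICT (by name: the statement is the Claim_ definition above) =====
theorem tradet_spec : Claim_equal_tradet := by
  intro prices _
  unfold Spec_tradet tradet
  cases prices with
  | nil => rfl
  | cons x xs =>
    obtain ⟨pre, mn, suf, heq, hpre, hsuf⟩ := exists_split x xs
    rw [heq, alt_char pre suf mn hpre hsuf]
    have hlen : (pre ++ mn :: suf).length = ((pre ++ mn :: suf).length - 1) + 1 := by
      rw [← heq]; simp
    exact go_char _ pre suf mn hlen hpre hsuf
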